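-- pv_equiv track=rewrite | github.com/matheus-rech/gnf-evidence-engine | src/extraction/pubmed_fetcher.py | _infer_study_design
-- ===== SOURCE A (Python) =====
-- from typing import Iterator, List, Optional
--
-- def _infer_study_design(pub_types: List[str]) -> str:
--     """Map publication type strings to internal study design labels."""
--     lower_types = [t.lower() for t in pub_types]
--     if any("randomized" in t or "rct" in t for t in lower_types):
--         return "RCT"
--     if any("cohort" in t or "longitudinal" in t for t in lower_types):
--         return "cohort"
--     if any("case-control" in t for t in lower_types):
--         return "case-control"
--     if any("cross-sectional" in t for t in lower_types):
--         return "cross-sectional"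
--     if any("meta-analysis" in t for t in lower_types):
--         return "meta-analysis"
--     if any("systematic review" in t for t in lower_types):
--         return "systematic-review"
--     return "other"
-- ===== SOURCE B (Python) =====
-- _RULES = [
--     (("randomized", "rct"), "RCT"),
--     (("cohort", "longitudinal"), "cohort"),
--     (("case-control",), "case-control"),
--     (("cross-sectional",), "cross-sectional"),
--     (("meta-analysis",), "meta-analysis"),
--     (("systematic review",), "systematic-review"),
-- ]
--
-- def _infer_study_design(pub_types):
--     """Single pass over pub_types, keeping the best (lowest) matching rule index."""
--     best = len(_RULES)
--     for t in pub_types: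
--         tl = t.lower()
--         for i, (kws, _label) in enumerate(_RULES):
--             if i >= best:
--                 break
--             if any(k in tl for k in kws):
--                 best = i
--                 break
--         if best == 0:
--             break
--     return _RULES[best][1] if best < len(_RULES) else "other"
-- ===== Notes on version B (the rewrite author's own statement) =====
-- stated objective: alternative
-- what changed: Replaced six sequential whole-list 'any' scans (one per category) by a single pass over pub_types that maintains a running best (minimum) rule index against an ordered keyword table, with early breaks (per string once an earlier rule index is reached, and overall once the top rule matches).
import Mathlib
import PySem

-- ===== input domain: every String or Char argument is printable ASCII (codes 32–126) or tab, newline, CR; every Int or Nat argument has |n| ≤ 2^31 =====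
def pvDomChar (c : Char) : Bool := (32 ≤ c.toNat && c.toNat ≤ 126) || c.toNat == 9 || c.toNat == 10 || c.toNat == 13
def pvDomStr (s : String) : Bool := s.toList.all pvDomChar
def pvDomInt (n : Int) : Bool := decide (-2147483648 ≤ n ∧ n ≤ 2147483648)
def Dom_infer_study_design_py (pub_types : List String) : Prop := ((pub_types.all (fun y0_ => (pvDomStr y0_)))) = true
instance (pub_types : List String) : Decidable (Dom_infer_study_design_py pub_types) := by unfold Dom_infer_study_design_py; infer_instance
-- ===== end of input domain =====

-- B replaces A's six sequential whole-list scans (one per category) by one pass over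
-- pub_types maintaining a running best (minimum) rule index over an ordered keyword table
-- (objective: alternative decomposition, same cost class).

-- ===== PORT A =====
def infer_study_design_py (pub_types : List String) : String :=
  let lower_types := pub_types.map PySem.Str.lower
  if lower_types.any (fun t => PySem.Str.isIn "randomized" t || PySem.Str.isIn "rct" t) then "RCT"
  else if lower_types.any (fun t => PySem.Str.isIn "cohort" t || PySem.Str.isIn "longitudinal" t) then "cohort"
  else if lower_types.any (fun t => PySem.Str.isIn "case-control" t) then "case-control"
  else if lower_types.any (fun t => PySem.Str.isIn "cross-sectional" t) then "cross-sectional"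
  else if lower_types.any (fun t => PySem.Str.isIn "meta-analysis" t) then "meta-analysis"
  else if lower_types.any (fun t => PySem.Str.isIn "systematic review" t) then "systematic-review"
  else "other"

-- ===== PORT B =====
-- the ordered rule table _RULES of Source B
def bRules : List (List String × String) :=
  [ (["randomized", "rct"], "RCT")
  , (["cohort", "longitudinal"], "cohort")
  , (["case-control"], "case-control")
  , (["cross-sectional"], "cross-sectional")
  , (["meta-analysis"], "meta-analysis")
  , (["systematic review"], "systematic-review") ]

-- 'any(k in tl for k in kws)'
def bMatch (kws : List String) (tl : String) : Bool :=
  kws.any (fun k => PySem.Str.isIn k tl)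

-- inner 'for i, (kws, _) in enumerate(_RULES)' loop: break at i >= best, else first match wins
def bFind : List (Int × (List String × String)) → String → Int → Int
  | [], _, best => best
  | (i, (kws, _)) :: rest, tl, best =>
      if best ≤ i then best
      else if bMatch kws tl then i
      else bFind rest tl best

-- outer loop over pub_types with early break at best == 0
def bLoop : List String → Int → Int
  | [], best => best
  | t :: rest, best =>
      let best' := bFind (PySem.List.enumerate bRules) (PySem.Str.lower t) best
      if best' = 0 then 0 else bLoop rest best'

def infer_study_design_py_alt (pub_types : List String) : String :=
  let best := bLoop pub_types (bRules.length : Int)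
  if best < (bRules.length : Int) then
    match PySem.List.pyGet? bRules best with   -- _RULES[best][1]; in range under the guard
    | some r => r.2
    | none => "other"
  else "other"

-- ===== PRECONDITION & SPEC =====
def Spec_infer_study_design_py (pub_types : List String) (out : String) : Prop := out = infer_study_design_py_alt pub_types
instance (pub_types : List String) (out : String) : Decidable (Spec_infer_study_design_py pub_types out) := by unfold Spec_infer_study_design_py; infer_instance

-- ===== CLAIM (what is proved, stated in full; the proofs are below) =====
def Claim_equal_infer_study_design_py : Prop := ∀ (pub_types : List String), Dom_infer_study_design_py pub_types → Spec_infer_study_design_py pub_types (infer_study_design_py pub_types)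

-- ===== LEMMAS AND PROOFS =====

-- the rule index the inner loop assigns to one lowered string (6 = no rule matches)
def pvRank (tl : String) : Int :=
  if bMatch ["randomized", "rct"] tl then 0
  else if bMatch ["cohort", "longitudinal"] tl then 1
  else if bMatch ["case-control"] tl then 2
  else if bMatch ["cross-sectional"] tl then 3
  else if bMatch ["meta-analysis"] tl then 4
  else if bMatch ["systematic review"] tl then 5
  else 6

-- minimum rank over the lowered strings
def pvM (ts : List String) : Int :=
  (ts.map (fun t => pvRank (PySem.Str.lower t))).foldr min 6

lemma pvRank_bounds (tl : String) : 0 ≤ pvRank tl ∧ pvRank tl ≤ 6 := by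
  unfold pvRank; split_ifs <;> omega

lemma pvM_bounds (ts : List String) : 0 ≤ pvM ts ∧ pvM ts ≤ 6 := by
  induction ts with
  | nil => simp [pvM]
  | cons t rest ih =>
      have h := pvRank_bounds (PySem.Str.lower t)
      simp only [pvM, List.map_cons, List.foldr_cons] at *
      omega

lemma enum_bRules : PySem.List.enumerate bRules =
  [ (0, (["randomized", "rct"], "RCT"))
  , (1, (["cohort", "longitudinal"], "cohort"))
  , (2, (["case-control"], "case-control"))
  , (3, (["cross-sectional"], "cross-sectional"))
  , (4, (["meta-analysis"], "meta-analysis"))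
  , (5, (["systematic review"], "systematic-review")) ] := by decide

lemma bFind_eq_min (tl : String) (best : Int) (h : best ≤ 6) :
    bFind (PySem.List.enumerate bRules) tl best = min (pvRank tl) best := by
  rw [enum_bRules]
  simp only [bFind, pvRank]
  by_cases c0 : bMatch ["randomized", "rct"] tl
  · simp only [c0, if_true]; split_ifs <;> omega
  simp only [c0]
  by_cases c1 : bMatch ["cohort", "longitudinal"] tl
  · simp only [c1, if_true]; split_ifs <;> omega
  simp only [c1]
  by_cases c2 : bMatch ["case-control"] tl
  · simp only [c2, if_true]; split_ifs <;> omega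
  simp only [c2]
  by_cases c3 : bMatch ["cross-sectional"] tl
  · simp only [c3, if_true]; split_ifs <;> omega
  simp only [c3]
  by_cases c4 : bMatch ["meta-analysis"] tl
  · simp only [c4, if_true]; split_ifs <;> omega
  simp only [c4]
  by_cases c5 : bMatch ["systematic review"] tl
  · simp only [c5, if_true]; split_ifs <;> omega
  · simp only [c5]; split_ifs <;> omega

lemma bLoop_eq_min (ts : List String) : ∀ best : Int, best ≤ 6 →
    bLoop ts best = min best (pvM ts) := by
  induction ts with
  | nil => intro best h; simp [bLoop, pvM]; omega
  | cons t rest ih =>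
      intro best h
      have hr := pvRank_bounds (PySem.Str.lower t)
      have hm := pvM_bounds rest
      simp only [bLoop, bFind_eq_min _ best h]
      have h1 : min (pvRank (PySem.Str.lower t)) best ≤ 6 := by omega
      have h2 := ih _ h1
      simp only [pvM, List.map_cons, List.foldr_cons]
      simp only [pvM] at h2 hm
      split_ifs with h0 <;> omega

lemma pvM_le_iff (ts : List String) (i : Int) (hi : i < 6) :
    pvM ts ≤ i ↔ ∃ t ∈ ts, pvRank (PySem.Str.lower t) ≤ i := by
  induction ts with
  | nil => simp [pvM]; omega
  | cons t rest ih =>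
      simp only [pvM, List.map_cons, List.foldr_cons] at *
      rw [min_le_iff]
      simp only [List.mem_cons]
      constructor
      · rintro (h | h)
        · exact ⟨t, Or.inl rfl, h⟩
        · obtain ⟨u, hu, hru⟩ := ih.mp h; exact ⟨u, Or.inr hu, hru⟩
      · rintro ⟨u, (rfl | hu), hru⟩
        · exact Or.inl hru
        · exact Or.inr (ih.mpr ⟨u, hu, hru⟩)

-- rank ≤ i ↔ one of the first i+1 categories matches
lemma pvRank_le_iff0 (tl : String) : pvRank tl ≤ 0 ↔ bMatch ["randomized", "rct"] tl = true := by
  unfold pvRank; split_ifs <;> simp_all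
lemma pvRank_le_iff1 (tl : String) : pvRank tl ≤ 1 ↔
    (bMatch ["randomized", "rct"] tl = true ∨ bMatch ["cohort", "longitudinal"] tl = true) := by
  unfold pvRank; split_ifs <;> simp_all
lemma pvRank_le_iff2 (tl : String) : pvRank tl ≤ 2 ↔
    (bMatch ["randomized", "rct"] tl = true ∨ bMatch ["cohort", "longitudinal"] tl = true ∨
     bMatch ["case-control"] tl = true) := by
  unfold pvRank; split_ifs <;> simp_all
lemma pvRank_le_iff3 (tl : String) : pvRank tl ≤ 3 ↔
    (bMatch ["randomized", "rct"] tl = true ∨ bMatch ["cohort", "longitudinal"] tl = true ∨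
     bMatch ["case-control"] tl = true ∨ bMatch ["cross-sectional"] tl = true) := by
  unfold pvRank; split_ifs <;> simp_all
lemma pvRank_le_iff4 (tl : String) : pvRank tl ≤ 4 ↔
    (bMatch ["randomized", "rct"] tl = true ∨ bMatch ["cohort", "longitudinal"] tl = true ∨
     bMatch ["case-control"] tl = true ∨ bMatch ["cross-sectional"] tl = true ∨
     bMatch ["meta-analysis"] tl = true) := by
  unfold pvRank; split_ifs <;> simp_all
lemma pvRank_le_iff5 (tl : String) : pvRank tl ≤ 5 ↔
    (bMatch ["randomized", "rct"] tl = true ∨ bMatch ["cohort", "longitudinal"] tl = true ∨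
     bMatch ["case-control"] tl = true ∨ bMatch ["cross-sectional"] tl = true ∨
     bMatch ["meta-analysis"] tl = true ∨ bMatch ["systematic review"] tl = true) := by
  unfold pvRank; split_ifs <;> simp_all

-- ===== VERDICT (by name: the statement is the Claim_ definition above) =====
set_option maxHeartbeats 2000000 in
theorem infer_study_design_py_spec : Claim_equal_infer_study_design_py := by
  intro ts _
  unfold Spec_infer_study_design_py infer_study_design_py
  have hlen : (bRules.length : Int) = 6 := by norm_num [bRules]
  have hM0 := (pvM_bounds ts).1
  have hM6 := (pvM_bounds ts).2
  set m := pvM ts with hm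
  have hb : bLoop ts 6 = m := by
    have h1 := bLoop_eq_min ts 6 (le_refl 6)
    omega
  simp only [List.any_map, List.any_eq_true, Function.comp]
  split_ifs with h0 h1 h2 h3 h4 h5
  · -- result "RCT"
      obtain ⟨t, ht, hc⟩ := h0
      have hup : m ≤ 0 := (pvM_le_iff ts 0 (by omega)).mpr
        ⟨t, ht, (pvRank_le_iff0 _).mpr (by simp [bMatch] at hc ⊢; tauto)⟩
      have hmj : m = 0 := by omega
      show _ = infer_study_design_py_alt ts
      unfold infer_study_design_py_alt
      rw [hlen, hb, hmj]
      decide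
  · -- result "cohort"
      obtain ⟨t, ht, hc⟩ := h1
      have hup : m ≤ 1 := (pvM_le_iff ts 1 (by omega)).mpr
        ⟨t, ht, (pvRank_le_iff1 _).mpr (by simp [bMatch] at hc ⊢; tauto)⟩
      have hdn : ¬ m ≤ 0 := by
        intro hcle
        obtain ⟨u, hu, hru⟩ := (pvM_le_iff ts 0 (by omega)).mp hcle
        rcases (pvRank_le_iff0 _).mp hru with hc
        · exact h0 ⟨u, hu, by simpa [bMatch] using hc⟩
      have hmj : m = 1 := by omega
      show _ = infer_study_design_py_alt ts
      unfold infer_study_design_py_alt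
      rw [hlen, hb, hmj]
      decide
  · -- result "case-control"
      obtain ⟨t, ht, hc⟩ := h2
      have hup : m ≤ 2 := (pvM_le_iff ts 2 (by omega)).mpr
        ⟨t, ht, (pvRank_le_iff2 _).mpr (by simp [bMatch] at hc ⊢; tauto)⟩
      have hdn : ¬ m ≤ 1 := by
        intro hcle
        obtain ⟨u, hu, hru⟩ := (pvM_le_iff ts 1 (by omega)).mp hcle
        rcases (pvRank_le_iff1 _).mp hru with hc | hc
        · exact h0 ⟨u, hu, by simpa [bMatch] using hc⟩
        · exact h1 ⟨u, hu, by simpa [bMatch] using hc⟩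
      have hmj : m = 2 := by omega
      show _ = infer_study_design_py_alt ts
      unfold infer_study_design_py_alt
      rw [hlen, hb, hmj]
      decide
  · -- result "cross-sectional"
      obtain ⟨t, ht, hc⟩ := h3
      have hup : m ≤ 3 := (pvM_le_iff ts 3 (by omega)).mpr
        ⟨t, ht, (pvRank_le_iff3 _).mpr (by simp [bMatch] at hc ⊢; tauto)⟩
      have hdn : ¬ m ≤ 2 := by
        intro hcle
        obtain ⟨u, hu, hru⟩ := (pvM_le_iff ts 2 (by omega)).mp hcle
        rcases (pvRank_le_iff2 _).mp hru with hc | hc | hc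
        · exact h0 ⟨u, hu, by simpa [bMatch] using hc⟩
        · exact h1 ⟨u, hu, by simpa [bMatch] using hc⟩
        · exact h2 ⟨u, hu, by simpa [bMatch] using hc⟩
      have hmj : m = 3 := by omega
      show _ = infer_study_design_py_alt ts
      unfold infer_study_design_py_alt
      rw [hlen, hb, hmj]
      decide
  · -- result "meta-analysis"
      obtain ⟨t, ht, hc⟩ := h4
      have hup : m ≤ 4 := (pvM_le_iff ts 4 (by omega)).mpr
        ⟨t, ht, (pvRank_le_iff4 _).mpr (by simp [bMatch] at hc ⊢; tauto)⟩
      have hdn : ¬ m ≤ 3 := by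
        intro hcle
        obtain ⟨u, hu, hru⟩ := (pvM_le_iff ts 3 (by omega)).mp hcle
        rcases (pvRank_le_iff3 _).mp hru with hc | hc | hc | hc
        · exact h0 ⟨u, hu, by simpa [bMatch] using hc⟩
        · exact h1 ⟨u, hu, by simpa [bMatch] using hc⟩
        · exact h2 ⟨u, hu, by simpa [bMatch] using hc⟩
        · exact h3 ⟨u, hu, by simpa [bMatch] using hc⟩
      have hmj : m = 4 := by omega
      show _ = infer_study_design_py_alt ts
      unfold infer_study_design_py_alt
      rw [hlen, hb, hmj]
      decide
  · -- result "systematic-review"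
      obtain ⟨t, ht, hc⟩ := h5
      have hup : m ≤ 5 := (pvM_le_iff ts 5 (by omega)).mpr
        ⟨t, ht, (pvRank_le_iff5 _).mpr (by simp [bMatch] at hc ⊢; tauto)⟩
      have hdn : ¬ m ≤ 4 := by
        intro hcle
        obtain ⟨u, hu, hru⟩ := (pvM_le_iff ts 4 (by omega)).mp hcle
        rcases (pvRank_le_iff4 _).mp hru with hc | hc | hc | hc | hc
        · exact h0 ⟨u, hu, by simpa [bMatch] using hc⟩
        · exact h1 ⟨u, hu, by simpa [bMatch] using hc⟩
        · exact h2 ⟨u, hu, by simpa [bMatch] using hc⟩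
        · exact h3 ⟨u, hu, by simpa [bMatch] using hc⟩
        · exact h4 ⟨u, hu, by simpa [bMatch] using hc⟩
      have hmj : m = 5 := by omega
      show _ = infer_study_design_py_alt ts
      unfold infer_study_design_py_alt
      rw [hlen, hb, hmj]
      decide
  · -- result "other"
      have hdn : ¬ m ≤ 5 := by
        intro hcle
        obtain ⟨u, hu, hru⟩ := (pvM_le_iff ts 5 (by omega)).mp hcle
        rcases (pvRank_le_iff5 _).mp hru with hc | hc | hc | hc | hc | hc
        · exact h0 ⟨u, hu, by simpa [bMatch] using hc⟩
        · exact h1 ⟨u, hu, by simpa [bMatch] using hc⟩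
        · exact h2 ⟨u, hu, by simpa [bMatch] using hc⟩
        · exact h3 ⟨u, hu, by simpa [bMatch] using hc⟩
        · exact h4 ⟨u, hu, by simpa [bMatch] using hc⟩
        · exact h5 ⟨u, hu, by simpa [bMatch] using hc⟩
      have hmj : m = 6 := by omega
      show _ = infer_study_design_py_alt ts
      unfold infer_study_design_py_alt
      rw [hlen, hb, hmj]
      decide
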